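-- pv_equiv track=rewrite | github.com/collinsakenga/codewars_solutions | 6 kyu/6 kyu_Find Added.py | findAdded
-- ===== SOURCE A (Python) =====
-- from collections import Counter
--
-- def findAdded(st1, st2):
--     temp1=Counter(st1)
--     temp2=Counter(st2)
--     res=""
--     for i,j in temp2.items():
--         if not temp1.get(i, None):
--             res+=i*j
--         elif temp2[i]>temp1[i]:
--             res+=i*(j-temp1[i])
--     return "".join(sorted(res))
-- ===== SOURCE B (Python) =====
-- def findAdded(st1, st2):
--     s1 = sorted(st1)
--     s2 = sorted(st2)
--     i = j = 0
--     res = []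
--     while i < len(s1) and j < len(s2):
--         if s1[i] == s2[j]:
--             i += 1
--             j += 1
--         elif s2[j] < s1[i]:
--             res.append(s2[j])
--             j += 1
--         else:
--             i += 1
--     res.extend(s2[j:])
--     return "".join(res)
-- ===== Notes on version B (the rewrite author's own statement) =====
-- stated objective: alternative
-- what changed: Replaces the Counter-difference loop followed by a final sort with a two-pointer merge of the two pre-sorted character lists that emits the surplus characters of st2 already in order.
import Mathlib
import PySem

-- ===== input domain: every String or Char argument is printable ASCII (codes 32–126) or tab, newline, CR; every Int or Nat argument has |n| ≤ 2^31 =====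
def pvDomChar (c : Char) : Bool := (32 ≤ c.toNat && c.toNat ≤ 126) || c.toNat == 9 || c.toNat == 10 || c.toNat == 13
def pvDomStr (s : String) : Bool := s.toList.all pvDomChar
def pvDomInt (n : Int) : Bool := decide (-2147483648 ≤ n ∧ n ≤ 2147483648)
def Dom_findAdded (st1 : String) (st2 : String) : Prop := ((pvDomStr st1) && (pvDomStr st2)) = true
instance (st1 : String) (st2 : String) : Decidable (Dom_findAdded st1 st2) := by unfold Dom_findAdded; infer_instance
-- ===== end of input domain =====

-- B replaces A's Counter-difference loop + final sort by a two-pointer merge of the two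
-- sorted character lists (alternative decomposition; the result is sorted by construction).

-- ===== PORT A =====
-- Counter(st1), Counter(st2); loop over temp2.items(); `not temp1.get(i, None)` is true
-- iff the key is absent or its value is 0 (falsy); i*j is List.replicate (Python str*int).
def findAdded (st1 : String) (st2 : String) : String :=
  let temp1 := PySem.Dict.counter st1.toList
  let temp2 := PySem.Dict.counter st2.toList
  let res := temp2.items.foldl (fun res ij =>
    match temp1.get? ij.1 with
    | none => res ++ List.replicate ij.2.toNat ij.1
    | some k =>
      if k = 0 then res ++ List.replicate ij.2.toNat ij.1
      else if ij.2 > k then res ++ List.replicate (ij.2 - k).toNat ij.1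
      else res) []
  String.mk (PySem.List.sorted res (fun x => x) false)

-- ===== PORT B =====
-- two-pointer merge loop of Source B: first pattern = "s2 exhausted", second = "s1 exhausted,
-- extend with the rest of s2", third = the three-way comparison of the while body
def pvMerge : List Char → List Char → List Char
  | _, [] => []
  | [], b :: bs => b :: bs
  | a :: as, b :: bs =>
    if a = b then pvMerge as bs
    else if b < a then b :: pvMerge (a :: as) bs
    else pvMerge as (b :: bs)
termination_by s1 s2 => s1.length + s2.length

def findAdded_alt (st1 : String) (st2 : String) : String :=
  String.mk (pvMerge (PySem.List.sorted st1.toList (fun x => x) false)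
                     (PySem.List.sorted st2.toList (fun x => x) false))

-- ===== PRECONDITION & SPEC =====
def Spec_findAdded (st1 : String) (st2 : String) (out : String) : Prop := out = findAdded_alt st1 st2
instance (st1 : String) (st2 : String) (out : String) : Decidable (Spec_findAdded st1 st2 out) := by unfold Spec_findAdded; infer_instance

-- ===== CLAIM (what is proved, stated in full; the proofs are below) =====
def Claim_equal_findAdded : Prop := ∀ (st1 : String) (st2 : String), Dom_findAdded st1 st2 → Spec_findAdded st1 st2 (findAdded st1 st2)

-- ===== LEMMAS AND PROOFS =====

-- the merge output is a sublist of its second argument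
theorem pvMerge_sublist : ∀ (s1 s2 : List Char), (pvMerge s1 s2).Sublist s2 := by
  intro s1 s2
  fun_induction pvMerge s1 s2 with
  | case1 => simp
  | case2 => simp
  | case3 as b bs ih => exact ih.cons b
  | case4 a as b bs =>
    rename_i hne hlt ih
    exact ih.cons₂ b
  | case5 a as b bs =>
    rename_i hne hlt ih
    exact ih

-- multiset content of the merge of two sorted lists: truncated count difference
theorem pvMerge_count (c : Char) : ∀ (s1 s2 : List Char),
    s1.Pairwise (· ≤ ·) → s2.Pairwise (· ≤ ·) →
    (pvMerge s1 s2).count c = s2.count c - s1.count c := by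
  intro s1 s2 h1 h2
  fun_induction pvMerge s1 s2 with
  | case1 => simp
  | case2 => simp
  | case3 as b bs ih =>
    rw [List.pairwise_cons] at h1 h2
    rw [ih h1.2 h2.2]
    by_cases hb : b = c <;> simp [hb]
  | case4 a as b bs =>
    rename_i hne hlt ih
    rw [List.pairwise_cons] at h2
    have ih' := ih h1 h2.2
    have hmem : b ∉ a :: as := by
      rw [List.mem_cons]
      rintro (hm | hm)
      · exact hne hm.symm
      · exact absurd hlt (not_lt.mpr ((List.pairwise_cons.mp h1).1 b hm))
    have h0 : (a :: as).count b = 0 := List.count_eq_zero.mpr hmem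
    simp only [List.count_cons] at h0 ⊢
    rw [ih']
    simp only [List.count_cons]
    rcases eq_or_ne b c with rfl | hbc
    · split_ifs at h0 ⊢ <;> omega
    · simp [hbc]
  | case5 a as b bs =>
    rename_i hne hlt ih
    rw [List.pairwise_cons] at h1
    rw [ih h1.2 h2]
    have hab : a < b := lt_of_le_of_ne (not_lt.mp hlt) hne
    have hmem : a ∉ b :: bs := by
      rw [List.mem_cons]
      rintro (hm | hm)
      · exact hne hm
      · exact absurd ((List.pairwise_cons.mp h2).1 a hm) (not_le.mpr hab)
    have h0 : (b :: bs).count a = 0 := List.count_eq_zero.mpr hmem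
    simp only [List.count_cons] at h0 ⊢
    rcases eq_or_ne a c with rfl | hac
    · split_ifs at h0 ⊢ <;> omega
    · simp [hac]

-- one step of A's loop body, at an item of Counter(l2), is an append of the surplus copies
theorem bodyA_eq (l1 l2 : List Char) (res : List Char) (k : Char) :
    (match (PySem.Dict.counter l1).get? k with
     | none => res ++ List.replicate ((l2.count k : Int)).toNat k
     | some v =>
       if v = 0 then res ++ List.replicate ((l2.count k : Int)).toNat k
       else if (l2.count k : Int) > v then res ++ List.replicate (((l2.count k : Int)) - v).toNat k
       else res)
    = res ++ List.replicate (l2.count k - l1.count k) k := by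
  by_cases hmem : k ∈ l1
  · have hcont : (PySem.Dict.counter l1).contains k = true := by
      rw [PySem.Dict.contains_counter]
      exact List.contains_iff_mem.mpr hmem
    have hsome : (PySem.Dict.counter l1).get? k = some ((l1.count k : Int)) := by
      rcases hv : (PySem.Dict.counter l1).get? k with _ | v
      · rw [PySem.Dict.get?_eq_none_iff_contains] at hv
        rw [hv] at hcont
        exact absurd hcont (by simp)
      · have hd := PySem.Dict.getD_counter l1 k
        rw [PySem.Dict.getD_eq_get?_getD, hv] at hd
        simp only [Option.getD_some] at hd
        rw [hd]
    rw [hsome]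
    have hpos : 0 < l1.count k := List.count_pos_iff.mpr hmem
    have hne : ((l1.count k : Int)) ≠ 0 := by omega
    simp only [hne, if_false]
    by_cases hgt : (l2.count k : Int) > (l1.count k : Int)
    · rw [if_pos hgt]
      have ht : (((l2.count k : Int)) - (l1.count k : Int)).toNat = l2.count k - l1.count k := by
        omega
      rw [ht]
    · rw [if_neg hgt]
      have h0 : l2.count k - l1.count k = 0 := by omega
      simp [h0]
  · have hnone : (PySem.Dict.counter l1).get? k = none := by
      rw [PySem.Dict.get?_eq_none_iff_contains, PySem.Dict.contains_counter]
      simp [hmem]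
    rw [hnone]
    have h0 : l1.count k = 0 := List.count_eq_zero.mpr hmem
    simp [h0]

-- count of the canonical fold (over a Nodup key list) at c
theorem count_fold (n : Char → Nat) (c : Char) : ∀ (ks : List Char) (acc : List Char), ks.Nodup →
    (ks.foldl (fun res k => res ++ List.replicate (n k) k) acc).count c
      = acc.count c + (if c ∈ ks then n c else 0) := by
  intro ks
  induction ks with
  | nil => simp
  | cons k ks ih =>
    intro acc hnd
    rw [List.nodup_cons] at hnd
    rw [List.foldl_cons, ih _ hnd.2]
    by_cases hc : c = k
    · subst hc
      simp [List.count_append, hnd.1]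
    · simp [List.count_append, List.count_replicate, hc, Ne.symm hc]

-- A's pre-sort list has the truncated count difference as its multiset content
theorem resA_count (l1 l2 : List Char) (c : Char) :
    ((PySem.Dict.counter l2).items.foldl (fun res ij =>
      match (PySem.Dict.counter l1).get? ij.1 with
      | none => res ++ List.replicate ij.2.toNat ij.1
      | some v =>
        if v = 0 then res ++ List.replicate ij.2.toNat ij.1
        else if ij.2 > v then res ++ List.replicate (ij.2 - v).toNat ij.1
        else res) []).count c = l2.count c - l1.count c := by
  rw [PySem.Dict.items_counter, List.foldl_map]
  rw [PySem.List.foldl_congr_mem _ _ (fun res k => res ++ List.replicate (l2.count k - l1.count k) k) _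
    (fun acc x _ => bodyA_eq l1 l2 acc x)]
  rw [count_fold _ c _ [] (PySem.Set.nodup_ofList l2)]
  by_cases hc : c ∈ l2
  · simp [PySem.Set.mem_ofList, hc]
  · have h0 : l2.count c = 0 := List.count_eq_zero.mpr hc
    simp [PySem.Set.mem_ofList, hc, h0]

-- ===== VERDICT (by name: the statement is the Claim_ definition above) =====
theorem findAdded_spec : Claim_equal_findAdded := by
  intro st1 st2 _
  unfold Spec_findAdded findAdded findAdded_alt
  dsimp only
  congr 1
  apply PySem.List.sorted_id_eq_of_perm_of_pairwise
  · apply List.perm_iff_count.mpr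
    intro c
    rw [pvMerge_count c _ _ (PySem.List.sorted_pairwise st1.toList (fun x => x))
      (PySem.List.sorted_pairwise st2.toList (fun x => x))]
    rw [resA_count st1.toList st2.toList c]
    rw [List.Perm.count_eq (PySem.List.sorted_perm st1.toList (fun x => x) false) c]
    rw [List.Perm.count_eq (PySem.List.sorted_perm st2.toList (fun x => x) false) c]
  · exact (PySem.List.sorted_pairwise st2.toList (fun x => x)).sublist (pvMerge_sublist _ _)
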